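-- pv_equiv track=rewrite | github.com/TEAMLAB-Lecture/morsecode-orol123456 | morsecode.py | is_validated_english_sentence
-- ===== SOURCE A (Python) =====
-- def is_validated_english_sentence(user_input):
--     a="_@#$%^&*()-+=[]}{\"';:\|`~0123456789"
--     if any(sym in user_input for sym in a):
--         return False
--     else:
--         for i in range(len(user_input)):
--             if user_input[i].isalpha():
--                 return True
--
--         return False
-- ===== SOURCE B (Python) =====
-- def is_validated_english_sentence(user_input):
--     forbidden = set("_@#$%^&*()-+=[]}{\"';:\\|`~0123456789")
--     has_alpha = False
--     for ch in user_input: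
--         if ch in forbidden:
--             return False
--         has_alpha = has_alpha or ch.isalpha()
--     return has_alpha
-- ===== Notes on version B (the rewrite author's own statement) =====
-- stated objective: alternative
-- what changed: A first runs any() testing each forbidden symbol as a substring of the whole input and then a second index loop searching for an alphabetic character; B makes one pass over the input with a forbidden-character set, returning False on the first forbidden character and otherwise accumulating a has_alpha flag returned at the end.
import Mathlib
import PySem

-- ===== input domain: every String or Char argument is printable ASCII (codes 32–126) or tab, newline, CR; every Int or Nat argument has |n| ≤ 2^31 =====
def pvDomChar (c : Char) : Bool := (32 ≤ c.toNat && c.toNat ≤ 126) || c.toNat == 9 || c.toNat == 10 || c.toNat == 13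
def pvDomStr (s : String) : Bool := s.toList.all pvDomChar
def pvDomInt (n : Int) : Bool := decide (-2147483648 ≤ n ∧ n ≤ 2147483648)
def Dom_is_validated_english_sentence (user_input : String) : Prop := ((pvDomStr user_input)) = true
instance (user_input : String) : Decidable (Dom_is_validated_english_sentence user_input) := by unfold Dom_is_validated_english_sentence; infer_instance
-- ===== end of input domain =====

-- B merges A's two scans (the any() forbidden-substring scan and the index alpha-search loop)
-- into one traversal carrying a has_alpha flag; objective: alternative (single pass, same cost class).


-- ===== PORT A =====
-- the Python literal "_@#$%^&*()-+=[]}{\"';:\|`~0123456789" (\| is backslash then pipe)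
def pvForbiddenA : List Char := "_@#$%^&*()-+=[]}{\"';:\\|`~0123456789".toList

-- 'for i in range(len(user_input)): if user_input[i].isalpha(): return True / return False'
-- (the index loop visits the characters in order; exact recursion over those characters)
def pvAlphaLoopA : List Char → Bool
  | [] => false
  | c :: rest => if PySem.Chars.isalpha c then true else pvAlphaLoopA rest

def is_validated_english_sentence (user_input : String) : Bool :=
  -- any(sym in user_input for sym in a): sym is a one-character string, 'in' is substring test
  if pvForbiddenA.any (fun sym => PySem.Chars.isIn [sym] user_input.toList) then
    false
  else
    pvAlphaLoopA user_input.toList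

-- ===== PORT B =====
-- forbidden = set("_@#$%^&*()-+=[]}{\"';:\\|`~0123456789")
def pvForbiddenB : PySem.Set Char := PySem.Set.ofList "_@#$%^&*()-+=[]}{\"';:\\|`~0123456789".toList

-- single pass: bail out on a forbidden char, otherwise accumulate the has_alpha flag
def pvScanB : List Char → Bool → Bool
  | [], hasAlpha => hasAlpha
  | ch :: rest, hasAlpha =>
      if PySem.Set.contains pvForbiddenB ch then false
      else pvScanB rest (hasAlpha || PySem.Chars.isalpha ch)

def is_validated_english_sentence_alt (user_input : String) : Bool :=
  pvScanB user_input.toList false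

-- ===== PRECONDITION & SPEC =====
def Spec_is_validated_english_sentence (user_input : String) (out : Bool) : Prop := out = is_validated_english_sentence_alt user_input
instance (user_input : String) (out : Bool) : Decidable (Spec_is_validated_english_sentence user_input out) := by unfold Spec_is_validated_english_sentence; infer_instance

-- ===== CLAIM (what is proved, stated in full; the proofs are below) =====
def Claim_equal_is_validated_english_sentence : Prop := ∀ (user_input : String), Dom_is_validated_english_sentence user_input → Spec_is_validated_english_sentence user_input (is_validated_english_sentence user_input)

-- ===== LEMMAS AND PROOFS =====

-- A's alpha loop is List.any isalpha
theorem pvAlphaLoopA_eq_any (l : List Char) : pvAlphaLoopA l = l.any PySem.Chars.isalpha := by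
  induction l with
  | nil => rfl
  | cons c rest ih => by_cases h : PySem.Chars.isalpha c <;> simp [pvAlphaLoopA, h, ih]

-- B's scan: first forbidden char wins, otherwise flag ∨ some alpha
theorem pvScanB_eq (l : List Char) (flag : Bool) :
    pvScanB l flag =
      if l.any (fun c => PySem.Set.contains pvForbiddenB c) then false
      else (flag || l.any PySem.Chars.isalpha) := by
  induction l generalizing flag with
  | nil => simp [pvScanB]
  | cons c rest ih =>
    simp only [pvScanB, List.any_cons]
    by_cases h : c ∈ pvForbiddenB
    · simp [h]
    · simp [h, ih, Bool.or_assoc]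

-- A's substring scan over the forbidden string equals a membership scan over the input
theorem pvForbidden_scan_eq (l : List Char) :
    pvForbiddenA.any (fun sym => PySem.Chars.isIn [sym] l) =
      l.any (fun c => PySem.Set.contains pvForbiddenB c) := by
  rw [Bool.eq_iff_iff]
  simp only [List.any_eq_true, PySem.Chars.isIn_iff_infix, List.singleton_infix_iff,
    PySem.Set.contains_iff]
  constructor
  · rintro ⟨sym, hs, hin⟩; exact ⟨sym, hin, hs⟩
  · rintro ⟨c, hin, hs⟩; exact ⟨c, hs, hin⟩

-- ===== VERDICT (by name: the statement is the Claim_ definition above) =====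
theorem is_validated_english_sentence_spec : Claim_equal_is_validated_english_sentence := by
  intro s _
  unfold Spec_is_validated_english_sentence is_validated_english_sentence is_validated_english_sentence_alt
  rw [pvScanB_eq, pvForbidden_scan_eq, pvAlphaLoopA_eq_any]
  split_ifs <;> simp
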